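-- pv_equiv track=rewrite | github.com/maxfordham/ipyautoui | src/ipyautoui/mydocstring_display.py | list_items_after
-- ===== SOURCE A (Python) =====
-- def list_items_after(li, after="Image"):
--     """
--     list all items in list after a given item
--     is found
--
--     Args:
--         li (list):
--         **after (?): list item after which new list begins
--             uses find in so partial string matches work
--
--     Returns:
--         li_ (list): category
--     """
--     li_ = []
--     b = False
--     for l in li:
--         if after in l:
--             b = True
--         li_.append(b)
--     if True not in li_:
--         return None
--     else:
--         index = [n for n in range(0, len(li_)) if li_[n]]
--         return li[index[0] : index[len(index) - 1] + 1]
-- ===== SOURCE B (Python) =====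
-- def list_items_after(li, after="Image"):
--     first = None
--     for i, l in enumerate(li):
--         if after in l and first is None:
--             first = i
--     return None if first is None else li[first:]
-- ===== Notes on version B (the rewrite author's own statement) =====
-- stated objective: simpler
-- what changed: B replaces A's boolean mask list, the 'True not in' membership test and the index comprehension with a single enumerate scan that records only the first matching index and returns li[first:] (or None).
import Mathlib
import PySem

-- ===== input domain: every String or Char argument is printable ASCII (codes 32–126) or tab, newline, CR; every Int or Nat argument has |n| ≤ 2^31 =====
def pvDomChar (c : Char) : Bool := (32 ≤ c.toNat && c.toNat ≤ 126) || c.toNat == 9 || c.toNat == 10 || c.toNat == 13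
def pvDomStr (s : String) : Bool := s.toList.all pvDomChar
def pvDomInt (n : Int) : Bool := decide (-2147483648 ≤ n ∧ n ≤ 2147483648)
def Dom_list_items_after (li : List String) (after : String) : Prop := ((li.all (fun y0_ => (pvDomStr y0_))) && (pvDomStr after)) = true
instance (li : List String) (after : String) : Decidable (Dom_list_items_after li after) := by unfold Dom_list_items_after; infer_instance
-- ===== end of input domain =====

-- B drops A's boolean mask list, membership test and index comprehension for a single
-- enumerate scan keeping only the first matching index (simpler; same O(n) cost).

-- ===== PORT A =====
def list_items_after (li : List String) (after : String) : Option (List String) :=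
  -- li_ = []; b = False; for l in li: if after in l: b = True; li_.append(b)
  let st := li.foldl (fun (acc : List Bool × Bool) l =>
      let b := if PySem.Str.isIn after l then true else acc.2
      (acc.1 ++ [b], b)) ([], false)
  let li_ := st.1
  if true ∉ li_ then
    none
  else
    let index := (PySem.List.pyRange 0 (PySem.List.len li_) 1).filter
        (fun n => PySem.List.pyGetD li_ n false)
    some (PySem.List.slice li (some (PySem.List.pyGetD index 0 0))
      (some (PySem.List.pyGetD index (PySem.List.len index - 1) 0 + 1)))

-- ===== PORT B =====
def list_items_after_alt (li : List String) (after : String) : Option (List String) :=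
  -- first = None; for i, l in enumerate(li): if after in l and first is None: first = i
  let first := (PySem.List.enumerate li).foldl
      (fun (first : Option Int) p =>
        if PySem.Str.isIn after p.2 && first.isNone then some p.1 else first) none
  match first with
  | none => none
  | some i => some (PySem.List.slice li (some i) none)

-- ===== PRECONDITION & SPEC =====
def Spec_list_items_after (li : List String) (after : String) (out : Option (List String)) : Prop := out = list_items_after_alt li after
instance (li : List String) (after : String) (out : Option (List String)) : Decidable (Spec_list_items_after li after out) := by unfold Spec_list_items_after; infer_instance

-- ===== CLAIM (what is proved, stated in full; the proofs are below) =====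
def Claim_equal_list_items_after : Prop := ∀ (li : List String) (after : String), Dom_list_items_after li after → Spec_list_items_after li after (list_items_after li after)

-- ===== LEMMAS AND PROOFS =====

/-- The cumulative-OR mask A's loop builds (for predicate `p`), starting from flag `b`. -/
def pvMask (p : String → Bool) : Bool → List String → List Bool
  | _, [] => []
  | b, l :: ls =>
    let b' := if p l then true else b
    b' :: pvMask p b' ls

theorem pvMask_foldl (p : String → Bool) (li : List String) (acc : List Bool) (b : Bool) :
    (li.foldl (fun (acc : List Bool × Bool) l =>
      let b := if p l then true else acc.2
      (acc.1 ++ [b], b)) (acc, b)).1 = acc ++ pvMask p b li := by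
  induction li generalizing acc b with
  | nil => simp [pvMask]
  | cons l ls ih =>
    simp only [List.foldl_cons]
    rw [ih]
    simp [pvMask]

theorem pvMask_true (p : String → Bool) (li : List String) :
    pvMask p true li = List.replicate li.length true := by
  induction li with
  | nil => rfl
  | cons l ls ih => simp [pvMask, ih, List.replicate_succ]

theorem pvMask_false (p : String → Bool) (li : List String) :
    pvMask p false li =
      match li.findIdx? p with
      | none => List.replicate li.length false
      | some k => List.replicate k false ++ List.replicate (li.length - k) true := by
  induction li with
  | nil => rfl
  | cons l ls ih =>
    rw [List.findIdx?_cons]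
    by_cases h : p l
    · simp [pvMask, h, pvMask_true, List.replicate_succ]
    · simp only [h, if_neg, Bool.false_eq_true, not_false_iff]
      cases hf : ls.findIdx? p with
      | none => simp [pvMask, h, ih, hf, List.replicate_succ]
      | some k =>
        simp [pvMask, h, ih, hf, List.replicate_succ, Nat.succ_sub_succ]

theorem pvFindIdx?_lt_length {α : Type} (p : α → Bool) (li : List α) (k : Nat)
    (h : li.findIdx? p = some k) : k < li.length := by
  induction li generalizing k with
  | nil => simp at h
  | cons l ls ih =>
    rw [List.findIdx?_cons] at h
    by_cases hp : p l
    · simp [hp] at h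
      subst h
      simp
    · simp [hp] at h
      obtain ⟨j, hj, rfl⟩ := h
      have := ih j hj
      simp
      omega

theorem pvFoldl_first_some (p : String → Bool) (xs : List (Int × String)) (j : Int) :
    (xs.foldl (fun (first : Option Int) q =>
      if p q.2 && first.isNone then some q.1 else first) (some j)) = some j := by
  induction xs with
  | nil => rfl
  | cons x xs ih => simpa using ih

theorem pvFoldl_first_none (p : String → Bool) (li : List String) (s : Int) :
    ((PySem.List.enumerate li s).foldl (fun (first : Option Int) q =>
      if p q.2 && first.isNone then some q.1 else first) none) =
      (li.findIdx? p).map (fun k => s + (k : Int)) := by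
  induction li generalizing s with
  | nil => simp [PySem.List.enumerate]
  | cons l ls ih =>
    rw [PySem.List.enumerate_cons, List.foldl_cons, List.findIdx?_cons]
    by_cases h : p l
    · simp only [h, Option.isNone_none, Bool.and_true, if_true]
      rw [pvFoldl_first_some]
      simp
    · simp only [h, Bool.false_and, if_neg, Bool.false_eq_true, not_false_iff]
      rw [ih (s + 1)]
      cases hf : ls.findIdx? p with
      | none => simp
      | some k =>
        simp
        ring

theorem pvMask_getD (k m j : Nat) (hj : j < k + m) :
    (List.replicate k false ++ List.replicate m true).getD j false = decide (k ≤ j) := by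
  rw [List.getD_eq_getElem?_getD, List.getElem?_append]
  by_cases h : j < k
  · simp [h, Nat.not_le.mpr h]
  · have : j - k < m := by omega
    simp [List.length_replicate, h, this, Nat.le_of_not_lt h]

theorem pvFilter_range (n k : Nat) :
    (List.range n).filter (fun j => decide (k ≤ j)) = List.range' k (n - k) := by
  induction n with
  | zero => simp
  | succ n ih =>
    rw [List.range_succ, List.filter_append, ih]
    by_cases h : k ≤ n
    · have h1 : n + 1 - k = (n - k) + 1 := by omega
      rw [h1, List.range'_concat]
      have h2 : k + (n - k) = n := by omega
      simp [h2, h]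
    · have h1 : n + 1 - k = 0 := by omega
      have h2 : n - k = 0 := by omega
      simp [h1, h2, h]

theorem list_items_after_eq (li : List String) (after : String) :
    list_items_after li after = list_items_after_alt li after := by
  unfold list_items_after list_items_after_alt
  simp only [pvMask_foldl, pvFoldl_first_none, pvMask_false, List.nil_append]
  cases hf : li.findIdx? (fun l => PySem.Str.isIn after l) with
  | none =>
    simp [List.mem_replicate]
  | some k =>
    simp only []
    have hk : k < li.length := pvFindIdx?_lt_length _ _ _ hf
    set n := li.length with hn
    have hmem : true ∈ List.replicate k false ++ List.replicate (n - k) true := by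
      apply List.mem_append_right
      exact List.mem_replicate.mpr ⟨by omega, rfl⟩
    simp only [hmem, not_true_eq_false, if_false, zero_add]
    have hlen : (List.replicate k false ++ List.replicate (n - k) true).length = n := by
      simp
      omega
    have hidx : ((PySem.List.pyRange 0 (PySem.List.len (List.replicate k false ++ List.replicate (n - k) true)) 1).filter
        (fun i => PySem.List.pyGetD (List.replicate k false ++ List.replicate (n - k) true) i false)) =
        (List.range' k (n - k)).map (fun j : Nat => ((j : Nat) : Int)) := by
      rw [PySem.List.len_eq, hlen, PySem.List.pyRange_one]
      have h0 : ((n : Int) - 0).toNat = n := by omega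
      rw [h0, List.filter_map]
      have hcongr : (List.range n).filter
          ((fun i => PySem.List.pyGetD (List.replicate k false ++ List.replicate (n - k) true) i false) ∘ (fun j : Nat => (0 : Int) + (j : Int))) =
          (List.range n).filter (fun j => decide (k ≤ j)) := by
        apply List.filter_congr
        intro j hj
        have hjn : j < n := List.mem_range.mp hj
        simp only [Function.comp, zero_add, PySem.List.pyGetD_natCast]
        rw [pvMask_getD k (n - k) j (by omega)]
      rw [hcongr, pvFilter_range]
      congr 1
      funext j
      simp
    rw [hidx]
    obtain ⟨m, hm'⟩ : ∃ m, n - k = m + 1 := ⟨n - k - 1, by omega⟩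
    rw [hm', List.range'_succ, List.map_cons, PySem.List.pyGetD_zero_cons]
    have hlen2 : PySem.List.len (((k : Nat) : Int) :: (List.range' (k + 1) m 1).map (fun j : Nat => ((j : Nat) : Int))) = (m : Int) + 1 := by
      simp [PySem.List.len]
    rw [hlen2]
    have hsub : (m : Int) + 1 - 1 = ((m : Nat) : Int) := by omega
    rw [hsub, PySem.List.pyGetD_natCast]
    have hget : (((k : Nat) : Int) :: (List.range' (k + 1) m 1).map (fun j : Nat => ((j : Nat) : Int))).getD m 0 = ((k + m : Nat) : Int) := by
      cases m with
      | zero => simp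
      | succ m' =>
        rw [List.getD_eq_getElem?_getD]
        simp only [List.getElem?_cons_succ]
        rw [List.getElem?_map, List.getElem?_range' (by omega)]
        simp
        ring
    rw [hget]
    have hbound : ((k + m : Nat) : Int) + 1 = ((n : Nat) : Int) := by push_cast; omega
    rw [hbound, PySem.List.slice_natCast]
    simp only [Option.pure_def, Option.bind_some, Option.map_some, Option.bind_eq_bind]
    rw [PySem.List.slice_from_natCast]
    congr 1
    apply List.take_of_length_le
    simp
    omega

-- ===== VERDICT (by name: the statement is the Claim_ definition above) =====
theorem list_items_after_spec : Claim_equal_list_items_after := by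
  intro li after _
  exact list_items_after_eq li after
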